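-- pv_equiv track=rewrite | github.com/salma97/Data-Science-Apriori-Algorithm | project.py | Left_combinations_rules
-- ===== SOURCE A (Python) =====
-- def getCombinations(arr, n, r):
--
-- 	# A temporary array to store all combination one by one
--     data = [0]*r
--     combinations = []
-- 	# get all combination using temprary array 'data[]'
--     combinationUtil(combinations , arr, data, 0, n - 1, 0, r)
--
--     return combinations
--
-- def combinationUtil(combinations , arr, data, start,end, index, r):
--
-- 	# Current combination is ready to be printed, print it
--     if (index == r):
--         combinations.append([])
--         for j in range(r):
--
--             combinations[-1].append(data[j])
--
--         return
--
-- 	# replace index with all possible elements. The condition "end-i+1 >= r-index" makes sure that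
-- 	# including one element at index will make a combination with remaining elements at remaining positions
--     i = start
--     while(i <= end and end - i + 1 >= r - index):
--         same_atrr_flag = False
--         if (index == 0):
--             data[index] = arr[i]
--             combinationUtil(combinations , arr, data, i + 1,end, index + 1, r)
--         else:
--             for k in range (index):
--                 if (data[k][5:7] == arr[i][5:7]):
--                     same_atrr_flag = True
--
--             if (same_atrr_flag):
--                 i += 1
--                 continue
--
--             data[index] = arr[i]
--             combinationUtil(combinations , arr, data, i + 1,end, index + 1, r)
--         i += 1
--
-- def Left_combinations_rules(singlerule):
--     rule_level = len(singlerule)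
--     TotalCombinations = list()
--     for i in range(rule_level-1):
--         semiComb=list(getCombinations(singlerule,len(singlerule),i+1))
--         for element in semiComb :
--             TotalCombinations.append(element)
--
--     return TotalCombinations
-- ===== SOURCE B (Python) =====
-- def Left_combinations_rules(singlerule):
--     n = len(singlerule)
--     res = []
--     for r in range(1, n):
--         # breadth-first: all strictly-increasing index lists of length r, in lex order
--         level = [[]]
--         for _ in range(r):
--             level = [c + [j] for c in level
--                      for j in range((c[-1] + 1) if c else 0, n)]
--         for idxs in level:
--             combo = [singlerule[j] for j in idxs]
--             if all(combo[a][5:7] != combo[b][5:7]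
--                    for a in range(r) for b in range(a + 1, r)):
--                 res.append(combo)
--     return res
-- ===== Notes on version B (the rewrite author's own statement) =====
-- stated objective: simpler
-- what changed: Replaces A's recursive generator with a mutable scratch array, size-prune and incremental attribute-prune by an iterative breadth-first enumeration of increasing index lists (one level per combination size) followed by a single all-pairs post-filter on the [5:7] attributes.
import Mathlib
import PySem

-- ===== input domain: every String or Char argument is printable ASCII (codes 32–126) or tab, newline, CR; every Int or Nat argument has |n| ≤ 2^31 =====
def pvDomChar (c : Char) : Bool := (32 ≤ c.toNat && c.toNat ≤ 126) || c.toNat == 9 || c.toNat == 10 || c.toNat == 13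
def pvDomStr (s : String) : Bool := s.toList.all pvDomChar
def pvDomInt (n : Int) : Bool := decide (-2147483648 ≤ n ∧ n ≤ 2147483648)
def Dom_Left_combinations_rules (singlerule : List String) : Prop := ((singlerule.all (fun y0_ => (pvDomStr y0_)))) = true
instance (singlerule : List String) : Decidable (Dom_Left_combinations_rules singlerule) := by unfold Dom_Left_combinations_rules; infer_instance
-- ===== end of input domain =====

-- B replaces A's recursive pruned generator by breadth-first index-combination levels plus an
-- all-pairs post-filter (objective: simpler; same results, not claimed faster).

-- ===== PORT A =====
set_option maxRecDepth 4096
-- A-side helpers: combinationUtil mutates `data` in place in Python; the port threads the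
-- array through and returns it together with the emitted combinations (pvCombLoop is A's
-- while-loop, one call per value of i).
mutual
def pvCombinationUtil : Nat → List String → List String → Int → Int → Nat → Nat →
    List String × List (List String)
  | 0, _, data, _, _, _, _ => (data, [])  -- fuel guard only; the fuel below always exceeds the call depth
  | fuel + 1, arr, data, start, endd, index, r =>
    if index = r then
      -- combinations.append([...]); data[j] is always in range here (data has length r)
      (data, [(List.range r).map (fun j => data.getD j "")])
    else
      pvCombLoop fuel arr data start endd index r
def pvCombLoop : Nat → List String → List String → Int → Int → Nat → Nat →
    List String × List (List String)
  | 0, _, data, _, _, _, _ => (data, [])  -- fuel guard only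
  | fuel + 1, arr, data, i, endd, index, r =>
    if i ≤ endd ∧ (r : Int) - (index : Int) ≤ endd - i + 1 then
      if index = 0 then
        -- arr[i]: i is in range whenever this is reached (0 ≤ i ≤ endd = len-1)
        let data1 := data.set index ((PySem.List.pyGet? arr i).getD "")
        let p1 := pvCombinationUtil fuel arr data1 (i + 1) endd (index + 1) r
        let p2 := pvCombLoop fuel arr p1.1 (i + 1) endd index r
        (p2.1, p1.2 ++ p2.2)
      else
        let flag := (List.range index).any (fun k =>
          PySem.Str.slice (data.getD k "") (some 5) (some 7) ==
          PySem.Str.slice ((PySem.List.pyGet? arr i).getD "") (some 5) (some 7))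
        if flag then
          pvCombLoop fuel arr data (i + 1) endd index r
        else
          let data1 := data.set index ((PySem.List.pyGet? arr i).getD "")
          let p1 := pvCombinationUtil fuel arr data1 (i + 1) endd (index + 1) r
          let p2 := pvCombLoop fuel arr p1.1 (i + 1) endd index r
          (p2.1, p1.2 ++ p2.2)
    else
      (data, [])
end

-- data = [0]*r : the integer placeholders are never read before being overwritten; ported as "".
def pvGetCombinations (arr : List String) (n : Int) (r : Nat) : List (List String) :=
  (pvCombinationUtil (2 * arr.length + 4) arr (List.replicate r "") 0 (n - 1) 0 r).2

def Left_combinations_rules (singlerule : List String) : List (List String) :=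
  let rule_level := singlerule.length
  (List.range (rule_level - 1)).foldl
    (fun acc i => acc ++ pvGetCombinations singlerule (singlerule.length : Int) (i + 1)) []

-- ===== PORT B =====
def Left_combinations_rules_alt (singlerule : List String) : List (List String) :=
  let n := singlerule.length
  (List.range' 1 (n - 1)).foldl (fun res r =>
    let level := (List.range r).foldl (fun level _ =>
      level.flatMap (fun c =>
        let start := match c.getLast? with | some j => j + 1 | none => 0
        (List.range' start (n - start)).map (fun j => c ++ [j])))
      ([[]] : List (List Nat))
    level.foldl (fun res idxs =>
      let combo := idxs.map (fun j => singlerule.getD j "")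
      if (List.range r).all (fun a =>
            (List.range' (a + 1) (r - (a + 1))).all (fun b =>
              !(PySem.Str.slice (combo.getD a "") (some 5) (some 7) ==
                PySem.Str.slice (combo.getD b "") (some 5) (some 7))))
      then res ++ [combo] else res) res) []

-- ===== PRECONDITION & SPEC =====
def Spec_Left_combinations_rules (singlerule : List String) (out : List (List String)) : Prop := out = Left_combinations_rules_alt singlerule
instance (singlerule : List String) (out : List (List String)) : Decidable (Spec_Left_combinations_rules singlerule out) := by unfold Spec_Left_combinations_rules; infer_instance

-- ===== CLAIM (what is proved, stated in full; the proofs are below) =====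
def Claim_equal_Left_combinations_rules : Prop := ∀ (singlerule : List String), Dom_Left_combinations_rules singlerule → Spec_Left_combinations_rules singlerule (Left_combinations_rules singlerule)


-- ===== LEMMAS AND PROOFS =====

-- the pruning attribute: s[5:7]
def pvKey (s : String) : String := PySem.Str.slice s (some 5) (some 7)

-- x may extend the partial combination d
def pvOk (d : List String) (x : String) : Bool := !(d.any (fun y => pvKey y == pvKey x))

-- the common specification: DFS over the remaining list, extending prefix d by k elements
def pvSpecL (d : List String) : List String → Nat → List (List String)
  | _, 0 => [d]
  | [], _ + 1 => []
  | x :: xs, k + 1 =>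
      (if pvOk d x then pvSpecL (d ++ [x]) xs k else []) ++ pvSpecL d xs (k + 1)

-- incremental validity of a whole combination after prefix d
def pvGood : List String → List String → Bool
  | _, [] => true
  | d, x :: c => pvOk d x && pvGood (d ++ [x]) c

-- all k-element combinations (as element lists), lexicographic by index
def pvCombsE : List String → Nat → List (List String)
  | _, 0 => [[]]
  | [], _ + 1 => []
  | x :: xs, k + 1 => ((pvCombsE xs k).map (x :: ·)) ++ pvCombsE xs (k + 1)

-- all strictly increasing index lists of length k drawn from [s, n)
def pvIdx (n : Nat) : Nat → Nat → List (List Nat)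
  | _, 0 => [[]]
  | s, k + 1 =>
      if _h : s < n then ((pvIdx n (s + 1) k).map (s :: ·)) ++ pvIdx n (s + 1) (k + 1)
      else []
termination_by s _k => n - s
decreasing_by all_goals omega

-- one breadth-first extension step of port B
def pvExt (n : Nat) (L : List (List Nat)) : List (List Nat) :=
  L.flatMap (fun c =>
    let start := match c.getLast? with | some j => j + 1 | none => 0
    (List.range' start (n - start)).map (fun j => c ++ [j]))

-- B's all-pairs attribute check
def pvChk (r : Nat) (combo : List String) : Bool :=
  (List.range r).all (fun a =>
    (List.range' (a + 1) (r - (a + 1))).all (fun b =>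
      !(pvKey (combo.getD a "") == pvKey (combo.getD b ""))))

lemma pvSpecL_short : ∀ (xs : List String) (k : Nat) (d : List String),
    xs.length < k → pvSpecL d xs k = [] := by
  intro xs
  induction xs with
  | nil =>
    intro k d h
    cases k with
    | zero => omega
    | succ k => simp [pvSpecL]
  | cons x xs ih =>
    intro k d h
    cases k with
    | zero => simp at h
    | succ k =>
      simp only [List.length_cons] at h
      simp only [pvSpecL]
      rw [ih k (d ++ [x]) (by omega), ih (k + 1) d (by omega)]
      simp

lemma pvRangeGetD (l : List String) :
    (List.range l.length).map (fun j => l.getD j "") = l := by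
  apply List.ext_getElem
  · simp
  · intro i h1 h2
    simp only [List.getElem_map, List.getElem_range]
    exact List.getD_eq_getElem l "" (by simpa using h1)

lemma pvAnyRange (data : List String) (index : Nat) (h : index ≤ data.length)
    (p : String → Bool) :
    ((List.range index).any (fun k => p (data.getD k ""))) = (data.take index).any p := by
  induction index with
  | zero => simp
  | succ i ih =>
    rw [List.range_succ, List.any_append, ih (by omega), List.take_add_one, List.any_append]
    have hi : i < data.length := by omega
    simp [List.getD_eq_getElem?_getD, List.getElem?_eq_getElem hi]

lemma pvTakeSet (l : List String) (i : Nat) (x : String) (h : i < l.length) :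
    (l.set i x).take (i + 1) = l.take i ++ [x] := by
  rw [List.take_add_one]
  simp [List.take_set, h]
  exact List.set_eq_of_length_le (by simp)

lemma pvA_main : ∀ (fuel : Nat) (arr data : List String) (m index r : Nat),
    m ≤ arr.length → data.length = r →
    ((index ≤ r → (arr.length - m) * 2 + 1 ≤ fuel →
      (pvCombinationUtil fuel arr data (m : Int) ((arr.length : Int) - 1) index r).1.length = r ∧
      (pvCombinationUtil fuel arr data (m : Int) ((arr.length : Int) - 1) index r).1.take index = data.take index ∧
      (pvCombinationUtil fuel arr data (m : Int) ((arr.length : Int) - 1) index r).2 =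
        pvSpecL (data.take index) (arr.drop m) (r - index)) ∧
     (index < r → (arr.length - m) * 2 ≤ fuel →
      (pvCombLoop fuel arr data (m : Int) ((arr.length : Int) - 1) index r).1.length = r ∧
      (pvCombLoop fuel arr data (m : Int) ((arr.length : Int) - 1) index r).1.take index = data.take index ∧
      (pvCombLoop fuel arr data (m : Int) ((arr.length : Int) - 1) index r).2 =
        pvSpecL (data.take index) (arr.drop m) (r - index))) := by
  intro fuel
  induction fuel with
  | zero =>
    intro arr data m index r hm hlen
    refine ⟨fun _ h => by omega, fun hir h => ?_⟩
    rw [pvCombLoop]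
    refine ⟨hlen, rfl, ?_⟩
    have hnil : arr.drop m = [] := List.drop_eq_nil_of_le (by omega)
    obtain ⟨k, hk⟩ : ∃ k, r - index = k + 1 := ⟨r - index - 1, by omega⟩
    rw [hnil, hk]
    simp [pvSpecL]
  | succ f IH =>
  intro arr data m index r hm hlen
  constructor
  · -- combinationUtil
    intro hir hμ
    rw [pvCombinationUtil]
    by_cases hxr : index = r
    · rw [if_pos hxr]
      refine ⟨hlen, rfl, ?_⟩
      have h0 : r - index = 0 := by omega
      rw [h0]
      rw [show pvSpecL (data.take index) (arr.drop m) 0 = [data.take index] from by simp [pvSpecL]]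
      rw [List.take_of_length_le (by omega)]
      show [(List.range r).map (fun j => data.getD j "")] = [data]
      rw [← hlen, pvRangeGetD]
    · rw [if_neg hxr]
      exact (IH arr data m index r hm hlen).2 (by omega) (by omega)
  · -- combLoop (the while loop, at loop variable i = m)
    intro hir hμ
    obtain ⟨k, hk⟩ : ∃ k, r - index = k + 1 := ⟨r - index - 1, by omega⟩
    rw [pvCombLoop]
    by_cases hcond : ((m : Int) ≤ (arr.length : Int) - 1 ∧
        ((r : Int) - (index : Int) ≤ (arr.length : Int) - 1 - (m : Int) + 1))
    · rw [if_pos hcond]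
      have hml : m < arr.length := by omega
      have hx : (PySem.List.pyGet? arr (m : Int)).getD "" = arr[m] := by
        rw [PySem.List.pyGet?_natCast]
        simp [List.getElem?_eq_getElem hml]
      have hdrop : arr.drop m = arr[m] :: arr.drop (m + 1) := List.drop_eq_getElem_cons hml
      have hcast : ((m : Int) + 1) = (((m + 1 : Nat)) : Int) := by push_cast; ring
      have hk2 : r - (index + 1) = k := by omega
      have hflag : ((List.range index).any (fun j =>
          PySem.Str.slice (data.getD j "") (some 5) (some 7) ==
          PySem.Str.slice arr[m] (some 5) (some 7)))
          = !(pvOk (data.take index) arr[m]) := by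
        rw [pvAnyRange data index (by omega)
          (fun y => PySem.Str.slice y (some 5) (some 7) == PySem.Str.slice arr[m] (some 5) (some 7))]
        simp [pvOk, pvKey]
      have hE : pvOk (data.take index) arr[m] = true →
          ((pvCombLoop f arr (pvCombinationUtil f arr (data.set index arr[m]) ((m : Int) + 1)
              ((arr.length : Int) - 1) (index + 1) r).1 ((m : Int) + 1)
              ((arr.length : Int) - 1) index r).1.length = r ∧
           (pvCombLoop f arr (pvCombinationUtil f arr (data.set index arr[m]) ((m : Int) + 1)
              ((arr.length : Int) - 1) (index + 1) r).1 ((m : Int) + 1)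
              ((arr.length : Int) - 1) index r).1.take index = data.take index ∧
           (pvCombinationUtil f arr (data.set index arr[m]) ((m : Int) + 1)
              ((arr.length : Int) - 1) (index + 1) r).2 ++
           (pvCombLoop f arr (pvCombinationUtil f arr (data.set index arr[m]) ((m : Int) + 1)
              ((arr.length : Int) - 1) (index + 1) r).1 ((m : Int) + 1)
              ((arr.length : Int) - 1) index r).2 =
            pvSpecL (data.take index) (arr.drop m) (r - index)) := by
        intro hok
        rw [hcast]
        obtain ⟨h1len, h1take, h1out⟩ :=
          (IH arr (data.set index arr[m]) (m + 1)
            (index + 1) r (by omega) (by simp [hlen])).1 (by omega) (by omega)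
        have hset : (data.set index arr[m]).take (index + 1) = data.take index ++ [arr[m]] :=
          pvTakeSet data index arr[m] (by omega)
        set u := pvCombinationUtil f arr (data.set index arr[m]) (((m + 1 : Nat)) : Int)
          ((arr.length : Int) - 1) (index + 1) r with hu
        have hpre : u.1.take index = data.take index := by
          have e1 : u.1.take index = (u.1.take (index + 1)).take index := by
            rw [List.take_take]
            congr 1
            omega
          rw [e1, h1take, hset]
          have h3 : ((data.take index) ++ [arr[m]]).take (data.take index).length = data.take index :=
            List.take_left
          rw [show (data.take index).length = index from by rw [List.length_take]; omega] at h3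
          exact h3
        obtain ⟨h2len, h2take, h2out⟩ :=
          (IH arr u.1 (m + 1) index r (by omega) h1len).2 (by omega) (by omega)
        refine ⟨h2len, by rw [h2take, hpre], ?_⟩
        rw [h1out, h2out, hpre, hset, hk2, hdrop, hk]
        simp only [pvSpecL]
        rw [if_pos hok]
      by_cases hok : pvOk (data.take index) arr[m] = true
      · have hEh := hE hok
        by_cases hidx : index = 0
        · rw [if_pos hidx]
          simp only [hx]
          exact hEh
        · rw [if_neg hidx]
          simp only [hx]
          rw [hflag, hok]
          rw [if_neg (by decide)]
          exact hEh
      · have hidx : ¬ index = 0 := by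
          intro h0
          apply hok
          rw [h0]
          simp [pvOk]
        have hokf : pvOk (data.take index) arr[m] = false := by
          cases hpv : pvOk (data.take index) arr[m]
          · rfl
          · exact absurd hpv hok
        rw [if_neg hidx]
        simp only [hx]
        rw [hflag, hokf]
        rw [if_pos (by decide)]
        rw [hcast]
        obtain ⟨hslen, hstake, hsout⟩ :=
          (IH arr data (m + 1) index r (by omega) hlen).2 (by omega) (by omega)
        refine ⟨hslen, hstake, ?_⟩
        rw [hsout, hdrop, hk]
        simp only [pvSpecL]
        rw [if_neg (by rw [hokf]; simp)]
        simp
    · rw [if_neg hcond]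
      refine ⟨hlen, rfl, ?_⟩
      by_cases hml : m < arr.length
      · have hlt : (arr.drop m).length < r - index := by
          rw [List.length_drop]
          omega
        rw [pvSpecL_short _ _ _ hlt]
      · have hnil : arr.drop m = [] := List.drop_eq_nil_of_le (by omega)
        rw [hnil, hk]
        simp [pvSpecL]

lemma pvA_perR (arr : List String) (r : Nat) :
    pvGetCombinations arr (arr.length : Int) r = pvSpecL [] arr r := by
  unfold pvGetCombinations
  have h := (pvA_main (2 * arr.length + 4) arr (List.replicate r "") 0 0 r (by omega)
    (by simp)).1 (by omega) (by omega)
  obtain ⟨-, -, h2⟩ := h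
  rw [Nat.cast_zero] at h2
  simpa using h2

lemma pvSpecL_filter : ∀ (xs : List String) (k : Nat) (d : List String),
    pvSpecL d xs k = ((pvCombsE xs k).filter (pvGood d)).map (d ++ ·) := by
  intro xs
  induction xs with
  | nil => intro k d; cases k <;> simp [pvSpecL, pvCombsE, pvGood]
  | cons x xs ih =>
    intro k d
    cases k with
    | zero => simp [pvSpecL, pvCombsE, pvGood]
    | succ k =>
      simp only [pvSpecL, pvCombsE, List.filter_append, List.map_append, List.filter_map]
      congr 1
      · cases hok : pvOk d x with
        | false =>
          have hp : (pvGood d ∘ (x :: ·)) = fun _ => false := by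
            funext c; simp [Function.comp, pvGood, hok]
          simp [hp]
        | true =>
          have hp : (pvGood d ∘ (x :: ·)) = pvGood (d ++ [x]) := by
            funext c; simp [Function.comp, pvGood, hok]
          simp only [if_true]
          rw [hp, ih k (d ++ [x]), List.map_map]
          apply List.map_congr_left
          intro c _
          show ((d ++ [x]) ++ ·) c = ((d ++ ·) ∘ (x :: ·)) c
          simp
      · exact ih (k + 1) d

lemma pvGood_iff : ∀ (c d : List String), pvGood d c = true ↔
    ((∀ y ∈ d, ∀ x ∈ c, pvKey y ≠ pvKey x) ∧ c.Pairwise (fun a b => pvKey a ≠ pvKey b)) := by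
  intro c
  induction c with
  | nil => intro d; simp [pvGood]
  | cons x c ih =>
    intro d
    simp only [pvGood, Bool.and_eq_true, ih, pvOk, Bool.not_eq_true', List.any_eq_false,
      beq_iff_eq, List.pairwise_cons]
    constructor
    · rintro ⟨h1, h2, h3⟩
      refine ⟨?_, ?_, h3⟩
      · intro y hy z hz
        rcases List.mem_cons.mp hz with rfl | hz'
        · exact h1 y hy
        · exact h2 y (List.mem_append.mpr (Or.inl hy)) z hz'
      · intro z hz
        exact h2 x (List.mem_append.mpr (Or.inr (List.mem_singleton.mpr rfl))) z hz
    · rintro ⟨h1, h2, h3⟩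
      refine ⟨fun y hy => h1 y hy x (List.mem_cons.mpr (Or.inl rfl)), ?_, h3⟩
      intro y hy z hz
      rcases List.mem_append.mp hy with hy' | hy'
      · exact h1 y hy' z (List.mem_cons.mpr (Or.inr hz))
      · rw [List.mem_singleton.mp hy']
        exact h2 z hz

lemma pvChk_eq_good (combo : List String) : pvChk combo.length combo = pvGood [] combo := by
  rw [Bool.eq_iff_iff, pvGood_iff]
  simp only [List.not_mem_nil, false_implies, implies_true, true_and]
  unfold pvChk
  simp only [List.all_eq_true, List.mem_range, List.mem_range'_1, Bool.not_eq_true', beq_eq_false_iff_ne,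
    ne_eq]
  constructor
  · intro H
    rw [List.pairwise_iff_getElem]
    intro i j hi hj hij
    have h := H i hi j ⟨by omega, by omega⟩
    rw [List.getD_eq_getElem _ _ hi, List.getD_eq_getElem _ _ hj] at h
    exact h
  · intro H a ha b hb
    have hblt : b < combo.length := by omega
    have h := List.pairwise_iff_getElem.mp H a b ha hblt (by omega)
    rw [List.getD_eq_getElem _ _ ha, List.getD_eq_getElem _ _ hblt]
    exact h

lemma pvCombsE_len : ∀ (xs : List String) (k : Nat) (c : List String),
    c ∈ pvCombsE xs k → c.length = k := by
  intro xs
  induction xs with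
  | nil =>
    intro k c h
    cases k with
    | zero => simp [pvCombsE] at h; simp [h]
    | succ k => simp [pvCombsE] at h
  | cons x xs ih =>
    intro k c h
    cases k with
    | zero => simp [pvCombsE] at h; simp [h]
    | succ k =>
      simp only [pvCombsE, List.mem_append, List.mem_map] at h
      rcases h with ⟨c', hc', rfl⟩ | h
      · simp [ih k c' hc']
      · exact ih (k + 1) c h

lemma pvIdx_one (n : Nat) : ∀ (t s : Nat), n - s ≤ t →
    pvIdx n s 1 = (List.range' s (n - s)).map (fun j => [j]) := by
  intro t
  induction t with
  | zero =>
    intro s hs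
    have hsn : ¬ s < n := by omega
    have h0 : n - s = 0 := by omega
    simp [pvIdx, hsn, h0]
  | succ t ih =>
    intro s hs
    by_cases hsn : s < n
    · rw [pvIdx, dif_pos hsn]
      rw [ih (s + 1) (by omega)]
      have h2 : n - s = (n - (s + 1)) + 1 := by omega
      rw [h2, List.range'_succ]
      simp [pvIdx]
    · have h0 : n - s = 0 := by omega
      simp [pvIdx, hsn, h0]

lemma pvIdx_ne_nil (n : Nat) : ∀ (t s k : Nat) (c : List Nat), n - s ≤ t →
    c ∈ pvIdx n s (k + 1) → c ≠ [] := by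
  intro t
  induction t with
  | zero =>
    intro s k c hs hc
    have hsn : ¬ s < n := by omega
    simp [pvIdx, hsn] at hc
  | succ t ih =>
    intro s k c hs hc
    by_cases hsn : s < n
    · rw [pvIdx, dif_pos hsn] at hc
      simp only [List.mem_append, List.mem_map] at hc
      rcases hc with ⟨c', _, rfl⟩ | hc
      · simp
      · exact ih (s + 1) k c (by omega) hc
    · simp [pvIdx, hsn] at hc

lemma pvExt_append (n : Nat) (X Y : List (List Nat)) :
    pvExt n (X ++ Y) = pvExt n X ++ pvExt n Y := by
  simp [pvExt]

lemma pvExt_map_cons (n a : Nat) (L : List (List Nat)) (h : ∀ c ∈ L, c ≠ []) :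
    pvExt n (L.map (a :: ·)) = (pvExt n L).map (a :: ·) := by
  unfold pvExt
  rw [List.flatMap_map, List.map_flatMap]
  rw [List.flatMap_def, List.flatMap_def]
  congr 1
  apply List.map_congr_left
  intro c hc
  obtain ⟨y, ys, rfl⟩ := List.exists_cons_of_ne_nil (h c hc)
  simp only [List.getLast?_cons_cons, List.map_map]
  rfl

lemma pvExt_idx (n : Nat) : ∀ (t s k : Nat), n - s ≤ t →
    pvExt n (pvIdx n s (k + 1)) = pvIdx n s (k + 2) := by
  intro t
  induction t with
  | zero =>
    intro s k hs
    have hsn : ¬ s < n := by omega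
    simp [pvIdx, hsn, pvExt]
  | succ t ih =>
    intro s k hs
    by_cases hsn : s < n
    · have e1 : pvIdx n s (k + 1) = (pvIdx n (s + 1) k).map (s :: ·) ++ pvIdx n (s + 1) (k + 1) := by
        rw [pvIdx, dif_pos hsn]
      have e2 : pvIdx n s (k + 2) = (pvIdx n (s + 1) (k + 1)).map (s :: ·) ++ pvIdx n (s + 1) (k + 2) := by
        rw [pvIdx, dif_pos hsn]
      rw [e1, e2, pvExt_append]
      congr 1
      · cases k with
        | zero =>
          rw [pvIdx_one n t (s + 1) (by omega)]
          simp [pvExt, pvIdx, List.map_map, List.getLast?_singleton]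
        | succ k' =>
          rw [pvExt_map_cons n s _ (fun c hc => pvIdx_ne_nil n t (s + 1) k' c (by omega) hc)]
          rw [ih (s + 1) k' (by omega)]
      · exact ih (s + 1) k (by omega)
    · have hz : ∀ k' : Nat, pvIdx n s (k' + 1) = ([] : List (List Nat)) := by
        intro k'; rw [pvIdx, dif_neg hsn]
      rw [show (k + 2) = (k + 1) + 1 from rfl, hz, hz]
      simp [pvExt]

lemma pvFold_ext (n : Nat) : ∀ (r : Nat),
    (List.range r).foldl (fun level _ =>
      level.flatMap (fun c =>
        let start := match c.getLast? with | some j => j + 1 | none => 0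
        (List.range' start (n - start)).map (fun j => c ++ [j])))
      ([[]] : List (List Nat)) = pvIdx n 0 r := by
  have key : ∀ r : Nat,
      (List.range r).foldl (fun L (_ : Nat) => pvExt n L) ([[]] : List (List Nat)) = pvIdx n 0 r := by
    intro r
    induction r with
    | zero => simp [pvIdx]
    | succ r ih =>
      rw [List.range_succ, List.foldl_append, ih]
      simp only [List.foldl_cons, List.foldl_nil]
      cases r with
      | zero =>
        rw [pvIdx_one n n 0 (by omega)]
        simp [pvExt, pvIdx]
      | succ r' => exact pvExt_idx n n 0 r' (by omega)
  intro r
  exact key r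

lemma pvIdx_map (arr : List String) : ∀ (t s k : Nat), arr.length - s ≤ t →
    (pvIdx arr.length s k).map (List.map (fun j => arr.getD j "")) = pvCombsE (arr.drop s) k := by
  intro t
  induction t with
  | zero =>
    intro s k hs
    have hsn : ¬ s < arr.length := by omega
    have hdrop : arr.drop s = [] := List.drop_eq_nil_of_le (by omega)
    cases k with
    | zero => simp [pvIdx, pvCombsE, hdrop]
    | succ k => simp [pvIdx, hsn, pvCombsE, hdrop]
  | succ t ih =>
    intro s k hs
    by_cases hsn : s < arr.length
    · cases k with
      | zero => simp [pvIdx, pvCombsE]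
      | succ k =>
        rw [pvIdx, dif_pos hsn]
        rw [List.drop_eq_getElem_cons hsn]
        simp only [pvCombsE, List.map_append, List.map_map]
        congr 1
        · rw [← ih (s + 1) k (by omega), List.map_map]
          apply List.map_congr_left
          intro c _
          simp [List.getD_eq_getElem?_getD, List.getElem?_eq_getElem hsn]
        · exact ih (s + 1) (k + 1) (by omega)
    · have hdrop : arr.drop s = [] := List.drop_eq_nil_of_le (by omega)
      cases k with
      | zero => simp [pvIdx, pvCombsE, hdrop]
      | succ k => simp [pvIdx, hsn, pvCombsE, hdrop]

set_option maxHeartbeats 1000000 in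
lemma pvB_perR (arr : List String) (res0 : List (List String)) (r : Nat) :
    (pvIdx arr.length 0 r).foldl (fun res idxs =>
      let combo := idxs.map (fun j => arr.getD j "")
      if (List.range r).all (fun a =>
            (List.range' (a + 1) (r - (a + 1))).all (fun b =>
              !(PySem.Str.slice (combo.getD a "") (some 5) (some 7) ==
                PySem.Str.slice (combo.getD b "") (some 5) (some 7))))
      then res ++ [combo] else res) res0
    = res0 ++ pvSpecL [] arr r := by
  have hstep : ∀ L : List (List Nat),
      L.foldl (fun res idxs =>
        let combo := idxs.map (fun j => arr.getD j "")
        if (List.range r).all (fun a =>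
              (List.range' (a + 1) (r - (a + 1))).all (fun b =>
                !(PySem.Str.slice (combo.getD a "") (some 5) (some 7) ==
                  PySem.Str.slice (combo.getD b "") (some 5) (some 7))))
        then res ++ [combo] else res) res0
      = res0 ++ (L.filter (fun idxs =>
          (List.range r).all (fun a =>
            (List.range' (a + 1) (r - (a + 1))).all (fun b =>
              !(PySem.Str.slice ((idxs.map (fun j => arr.getD j "")).getD a "") (some 5) (some 7) ==
                PySem.Str.slice ((idxs.map (fun j => arr.getD j "")).getD b "") (some 5) (some 7)))))).map
          (fun idxs => idxs.map (fun j => arr.getD j "")) := fun L =>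
    PySem.List.foldl_append_if _ _ L res0
  rw [hstep (pvIdx arr.length 0 r)]
  have hcomb : pvCombsE arr r = (pvIdx arr.length 0 r).map (List.map (fun j => arr.getD j "")) := by
    rw [pvIdx_map arr arr.length 0 r (by omega), List.drop_zero]
  have hfilter : (pvIdx arr.length 0 r).filter (fun idxs =>
          (List.range r).all (fun a =>
            (List.range' (a + 1) (r - (a + 1))).all (fun b =>
              !(PySem.Str.slice ((idxs.map (fun j => arr.getD j "")).getD a "") (some 5) (some 7) ==
                PySem.Str.slice ((idxs.map (fun j => arr.getD j "")).getD b "") (some 5) (some 7)))))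
      = (pvIdx arr.length 0 r).filter
        (fun idxs => pvGood [] (idxs.map (fun j => arr.getD j ""))) := by
    apply List.filter_congr
    intro idxs hidx
    have hmem : (idxs.map (fun j => arr.getD j "")) ∈ pvCombsE arr r := by
      rw [hcomb]
      exact List.mem_map_of_mem hidx
    have hlen := pvCombsE_len arr r _ hmem
    show pvChk r (idxs.map (fun j => arr.getD j "")) = pvGood [] (idxs.map (fun j => arr.getD j ""))
    rw [← hlen]
    exact pvChk_eq_good _
  rw [hfilter, pvSpecL_filter arr r [], hcomb, List.filter_map]
  simp [Function.comp_def, List.map_map]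

-- port B's outer loop body, for one value of r
set_option maxHeartbeats 1000000 in
lemma pvB_body (arr : List String) (res : List (List String)) (r : Nat) :
    (let level := (List.range r).foldl (fun level _ =>
        level.flatMap (fun c =>
          let start := match c.getLast? with | some j => j + 1 | none => 0
          (List.range' start (arr.length - start)).map (fun j => c ++ [j])))
        ([[]] : List (List Nat))
     level.foldl (fun res idxs =>
        let combo := idxs.map (fun j => arr.getD j "")
        if (List.range r).all (fun a =>
              (List.range' (a + 1) (r - (a + 1))).all (fun b =>
                !(PySem.Str.slice (combo.getD a "") (some 5) (some 7) ==
                  PySem.Str.slice (combo.getD b "") (some 5) (some 7))))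
        then res ++ [combo] else res) res)
    = res ++ pvSpecL [] arr r := by
  rw [pvFold_ext arr.length r]
  exact pvB_perR arr res r

-- ===== VERDICT (by name: the statement is the Claim_ definition above) =====
set_option maxHeartbeats 1000000 in
theorem Left_combinations_rules_spec : Claim_equal_Left_combinations_rules := by
  intro arr _hdom
  unfold Spec_Left_combinations_rules
  simp only [Left_combinations_rules, Left_combinations_rules_alt]
  rw [PySem.List.foldl_append_eq_flatMap]
  trans ((List.range' 1 (arr.length - 1)).foldl (fun res r => res ++ pvSpecL [] arr r) [])
  · rw [PySem.List.foldl_append_eq_flatMap]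
    simp only [List.nil_append]
    rw [List.range'_eq_map_range, List.flatMap_map]
    congr 1
    funext i
    rw [Nat.add_comm 1 i]
    exact pvA_perR arr (i + 1)
  · apply PySem.List.foldl_congr_mem
    intro acc x _
    exact (pvB_body arr acc x).symm
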